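-- pv_equiv track=rewrite | github.com/ARaZoAnna/algorithm | programmers/Level0/no43.py | solution
-- ===== SOURCE A (Python) =====
-- def solution(arr):
--     stk = []
--     n = len(arr)
--     i = 0
--
--     while i < n :
--         if len(stk) == 0 :
--             stk.append(arr[i])
--             i+=1
--             continue
--         tmp = len(stk)
--         if stk[tmp-1] < arr[i] :
--             stk.append(arr[i])
--             i += 1
--             continue
--         stk.pop()
--
--     return stk
-- ===== SOURCE B (Python) =====
-- def solution(arr):
--     res = []
--     m = None
--     for x in reversed(arr):
--         if m is None or x < m:
--             res.append(x)
--             m = x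
--     return res[::-1]
-- ===== Notes on version B (the rewrite author's own statement) =====
-- stated objective: faster
-- what changed: Replaces the push/pop stack simulation with a single right-to-left pass keeping each element iff it is strictly below the running minimum of the elements to its right, then reversing the kept list.
import Mathlib
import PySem

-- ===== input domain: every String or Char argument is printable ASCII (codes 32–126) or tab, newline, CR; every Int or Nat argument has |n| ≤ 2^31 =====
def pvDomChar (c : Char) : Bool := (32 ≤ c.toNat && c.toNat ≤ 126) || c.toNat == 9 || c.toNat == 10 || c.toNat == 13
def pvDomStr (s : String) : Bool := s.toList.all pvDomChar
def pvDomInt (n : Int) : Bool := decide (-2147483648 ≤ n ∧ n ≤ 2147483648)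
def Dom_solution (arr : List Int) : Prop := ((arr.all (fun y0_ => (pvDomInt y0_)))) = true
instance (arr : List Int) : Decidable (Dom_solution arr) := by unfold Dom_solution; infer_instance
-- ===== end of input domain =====

-- B replaces A's push/pop stack simulation by one right-to-left pass keeping each
-- element iff it is strictly below the running minimum of everything to its right.

-- ===== PORT A =====
-- literal transliteration of A's while-loop: state (i, stk); stk[len-1] is stk.getLast!
-- (exact: that branch is only reached with stk nonempty), stk.pop() is dropLast.
def solutionLoop (arr : List Int) (i : Nat) (stk : List Int) : List Int :=
  if h : i < arr.length then
    if stk.length = 0 then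
      solutionLoop arr (i + 1) (stk ++ [arr[i]])
    else if stk.getLast! < arr[i] then
      solutionLoop arr (i + 1) (stk ++ [arr[i]])
    else
      solutionLoop arr i stk.dropLast
  else stk
termination_by 2 * (arr.length - i) + stk.length
decreasing_by
  · simp [List.length_append]; omega
  · simp [List.length_append]; omega
  · simp [List.length_dropLast]; omega

def solution (arr : List Int) : List Int := solutionLoop arr 0 []

-- ===== PORT B =====
-- state of B's for-loop: (res, m); iterates over reversed(arr); res[::-1] at the end
def altStep (p : List Int × Option Int) (x : Int) : List Int × Option Int :=
  match p.2 with
  | none => (p.1 ++ [x], some x)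
  | some m => if x < m then (p.1 ++ [x], some x) else p

def solution_alt (arr : List Int) : List Int :=
  ((arr.reverse.foldl altStep ([], none)).1).reverse

-- ===== PRECONDITION & SPEC =====
def Spec_solution (arr : List Int) (out : List Int) : Prop := out = solution_alt arr
instance (arr : List Int) (out : List Int) : Decidable (Spec_solution arr out) := by unfold Spec_solution; infer_instance

-- ===== CLAIM (what is proved, stated in full; the proofs are below) =====
def Claim_equal_solution : Prop := ∀ (arr : List Int), Dom_solution arr → Spec_solution arr (solution arr)

-- ===== LEMMAS AND PROOFS =====

-- A's loop in reversed-stack form: one step pops (drops from the head of the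
-- reversed stack) everything ≥ x, then pushes x.
def step' (rstk : List Int) (x : Int) : List Int :=
  x :: rstk.dropWhile (fun t => !decide (t < x))

-- survivors of l, in reverse order: x is kept iff x < every element to its right
def srev : List Int → List Int
  | [] => []
  | x :: l => if l.all (fun y => decide (x < y)) then srev l ++ [x] else srev l

-- B's kept list as a plain recursion over the (already reversed) input
def hk : Option Int → List Int → List Int
  | _, [] => []
  | none, x :: r => x :: hk (some x) r
  | some m, x :: r => if x < m then x :: hk (some x) r else hk (some m) r

lemma foldl_altStep_fst : ∀ (r res : List Int) (m : Option Int),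
    (List.foldl altStep (res, m) r).1 = res ++ hk m r := by
  intro r
  induction r with
  | nil => intro res m; simp [hk]
  | cons x r ih =>
    intro res m
    cases m with
    | none => simp only [List.foldl_cons, altStep, hk, ih, List.append_assoc, List.singleton_append]
    | some m =>
      by_cases hx : x < m
      · simp only [List.foldl_cons, altStep, if_pos hx, hk, ih, List.append_assoc,
          List.singleton_append]
      · simp only [List.foldl_cons, altStep, if_neg hx, hk, ih]

def keepCond (m : Option Int) (x : Int) : Bool :=
  match m with
  | none => true
  | some m => decide (x < m)

lemma hk_append : ∀ (r : List Int) (m : Option Int) (x : Int),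
    hk m (r ++ [x]) =
      hk m r ++ (if keepCond m x && r.all (fun y => decide (x < y)) then [x] else []) := by
  intro r
  induction r with
  | nil => intro m x; cases m with
    | none => simp [hk, keepCond]
    | some m => by_cases hx : x < m <;> simp [hk, keepCond, hx]
  | cons y r ih =>
    intro m x
    cases m with
    | none =>
      simp only [List.cons_append, hk, ih, keepCond, List.all_cons, Bool.true_and]
      rfl
    | some m =>
      by_cases hy : y < m
      · simp only [List.cons_append, hk, if_pos hy, ih, keepCond, List.all_cons]
        have : (decide (x < m) && (decide (x < y) && r.all fun y => decide (x < y)))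
            = (decide (x < y) && r.all fun y => decide (x < y)) := by
          by_cases hxy : x < y
          · have : x < m := lt_trans hxy hy
            simp [hxy, this]
          · simp [hxy]
        simp only [this]
        rfl
      · simp only [List.cons_append, hk, if_neg hy, ih, keepCond, List.all_cons]
        have hm : m ≤ y := le_of_not_gt hy
        have : (decide (x < m) && (decide (x < y) && r.all fun y => decide (x < y)))
            = (decide (x < m) && r.all fun y => decide (x < y)) := by
          by_cases hxm : x < m
          · have : x < y := lt_of_lt_of_le hxm hm
            simp [hxm, this]
          · simp [hxm]
        simp only [this]
        rfl

lemma srev_eq_hk : ∀ (l : List Int), srev l = hk none l.reverse := by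
  intro l
  induction l with
  | nil => simp [srev, hk]
  | cons x l ih =>
    simp only [srev, List.reverse_cons, hk_append, keepCond, Bool.true_and, List.all_reverse, ih]
    by_cases hc : l.all (fun y => decide (x < y)) <;> simp [hc]

lemma dropWhile_eq_filter : ∀ (r : List Int) (x : Int),
    r.Pairwise (fun a b => b < a) →
    r.dropWhile (fun t => !decide (t < x)) = r.filter (fun t => decide (t < x)) := by
  intro r x
  induction r with
  | nil => intro _; simp
  | cons h t ih =>
    intro hp
    rcases List.pairwise_cons.1 hp with ⟨hall, hpt⟩
    by_cases hx : h < x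
    · have : ∀ a ∈ t, decide (a < x) = true := fun a ha => by
        simp [lt_trans (hall a ha) hx]
      simp [List.dropWhile_cons, List.filter_cons, hx, List.filter_eq_self.2 this]
    · simp [List.dropWhile_cons, List.filter_cons, hx, ih hpt]

lemma foldl_step'_char : ∀ (l rstk : List Int),
    rstk.Pairwise (fun a b => b < a) →
    List.foldl step' rstk l = srev l ++ rstk.filter (fun t => l.all (fun y => decide (t < y))) := by
  intro l
  induction l with
  | nil => intro rstk _; simp [srev]
  | cons x l ih =>
    intro rstk hp
    have hstep : step' rstk x = x :: rstk.filter (fun t => decide (t < x)) := by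
      simp [step', dropWhile_eq_filter rstk x hp]
    have hp' : (x :: rstk.filter (fun t => decide (t < x))).Pairwise (fun a b => b < a) := by
      refine List.pairwise_cons.2 ⟨?_, hp.sublist List.filter_sublist⟩
      intro a ha
      exact of_decide_eq_true (List.mem_filter.1 ha).2
    have hrec := ih (x :: rstk.filter (fun t => decide (t < x))) hp'
    rw [List.foldl_cons, hstep, hrec]
    by_cases hc : (l.all fun y => decide (x < y)) = true
    · -- x survives: every element of the pushed-below part survives too
      have hfx : (rstk.filter (fun t => decide (t < x))).filter
            (fun t => l.all (fun y => decide (t < y)))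
          = rstk.filter (fun t => decide (t < x)) := by
        refine List.filter_eq_self.2 ?_
        intro a ha
        have hax : a < x := of_decide_eq_true (List.mem_filter.1 ha).2
        refine List.all_eq_true.2 ?_
        intro y hy
        exact decide_eq_true (lt_trans hax (of_decide_eq_true (List.all_eq_true.1 hc y hy)))
      have h1 : List.filter (fun t => l.all fun y => decide (t < y))
            (x :: List.filter (fun t => decide (t < x)) rstk)
          = x :: List.filter (fun t => decide (t < x)) rstk := by
        rw [List.filter_cons_of_pos (by simpa using hc), hfx]
      have hrfilter : rstk.filter (fun t => (x :: l).all (fun y => decide (t < y)))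
          = rstk.filter (fun t => decide (t < x)) := by
        refine List.filter_congr ?_
        intro a _
        by_cases hax : a < x
        · have : ∀ y ∈ l, decide (a < y) = true := fun y hy =>
            decide_eq_true (lt_trans hax (of_decide_eq_true (List.all_eq_true.1 hc y hy)))
          simp [List.all_cons, hax, List.all_eq_true.2 this]
        · simp [List.all_cons, hax]
      have h2 : srev (x :: l) = srev l ++ [x] := by simp [srev, hc]
      rw [h1, h2, hrfilter]
      simp
    · -- x is dropped
      have h2 : srev (x :: l) = srev l := by simp [srev, hc]
      have h1 : List.filter (fun t => l.all fun y => decide (t < y))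
            (x :: List.filter (fun t => decide (t < x)) rstk)
          = List.filter (fun t => l.all fun y => decide (t < y))
              (List.filter (fun t => decide (t < x)) rstk) := by
        exact List.filter_cons_of_neg (by simpa using hc)
      have h3 : rstk.filter (fun t => (x :: l).all (fun y => decide (t < y)))
          = (rstk.filter (fun t => decide (t < x))).filter
              (fun t => l.all (fun y => decide (t < y))) := by
        rw [List.filter_filter]
        refine List.filter_congr ?_
        intro a _
        simp [List.all_cons, Bool.and_comm]
      rw [h1, h2, h3]

lemma solutionLoop_eq : ∀ (arr : List Int) (i : Nat) (stk : List Int),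
    solutionLoop arr i stk = (List.foldl step' stk.reverse (arr.drop i)).reverse := by
  intro arr i stk
  induction i, stk using solutionLoop.induct arr with
  | case1 i stk h hlen ih =>
    rw [solutionLoop, dif_pos h, if_pos hlen, ih]
    have hstk : stk = [] := List.length_eq_zero_iff.1 hlen
    have hdrop : arr.drop i = arr[i] :: arr.drop (i + 1) := List.drop_eq_getElem_cons h
    subst hstk
    rw [hdrop, List.foldl_cons]
    simp [step']
  | case2 i stk h hlen hlt ih =>
    rw [solutionLoop, dif_pos h, if_neg hlen, if_pos hlt, ih]
    have hne : stk ≠ [] := fun hc => hlen (by simp [hc])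
    have hdrop : arr.drop i = arr[i] :: arr.drop (i + 1) := List.drop_eq_getElem_cons h
    rw [hdrop]
    have hrev : stk.reverse = stk.getLast! :: stk.dropLast.reverse := by
      rw [List.getLast!_of_getLast? (List.getLast?_eq_some_getLast hne)]
      conv_lhs => rw [← List.dropLast_append_getLast hne]
      simp
    rw [List.foldl_cons]
    have : step' stk.reverse arr[i] = (stk ++ [arr[i]]).reverse := by
      rw [hrev]
      simp only [step', List.dropWhile_cons, decide_eq_true hlt, Bool.not_true, if_false]
      rw [← hrev]
      simp
    rw [this]
  | case3 i stk h hlen hlt ih =>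
    rw [solutionLoop, dif_pos h, if_neg hlen, if_neg hlt, ih]
    have hne : stk ≠ [] := fun hc => hlen (by simp [hc])
    have hdrop : arr.drop i = arr[i] :: arr.drop (i + 1) := List.drop_eq_getElem_cons h
    rw [hdrop]
    have hrev : stk.reverse = stk.getLast! :: stk.dropLast.reverse := by
      rw [List.getLast!_of_getLast? (List.getLast?_eq_some_getLast hne)]
      conv_lhs => rw [← List.dropLast_append_getLast hne]
      simp
    rw [List.foldl_cons, List.foldl_cons]
    have : step' stk.reverse arr[i] = step' stk.dropLast.reverse arr[i] := by
      rw [hrev]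
      have hdec : decide (stk.getLast! < arr[i]) = false := decide_eq_false hlt
      simp only [step', List.dropWhile_cons, hdec]
      simp
    rw [this]
  | case4 i stk h =>
    rw [solutionLoop, dif_neg h]
    rw [List.drop_eq_nil_of_le (le_of_not_gt h)]
    simp

-- ===== VERDICT (by name: the statement is the Claim_ definition above) =====
theorem solution_spec : Claim_equal_solution := by
  intro arr _
  unfold Spec_solution solution solution_alt
  rw [solutionLoop_eq, List.drop_zero, List.reverse_nil,
    foldl_step'_char arr [] (List.Pairwise.nil), foldl_altStep_fst, srev_eq_hk]
  simp
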